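-- pv_equiv track=rewrite | github.com/PdxCodeGuild/2019-10-28-fullstack-night | Assignments/pete/lab18-peaks-and-valleys-v3.py | valley_filler
-- ===== SOURCE A (Python) =====
-- def max_finder(data):
--     return max(data)
--
-- def valley_filler(data):
--     count = 0
--     O_count = 0
--     first_run = True
--     for datum in data:
--         count += 1
--         if datum < max_finder(data):
--             O_count += max_finder(data) - datum
--         if first_run != True and datum == max_finder(data):
--             break
--         first_run = False
--     return (O_count, count)
-- ===== SOURCE B (Python) =====
-- def valley_filler(data):
--     if not data:
--         return (0, 0)
--     m = max(data)
--     try: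
--         stop = data.index(m, 1) + 1
--     except ValueError:
--         stop = len(data)
--     # every element <= m and elements equal to m contribute 0 gap,
--     # so the total fill is m*stop - sum(prefix): no per-element comparison needed
--     return (m * stop - sum(data[:stop]), stop)
-- ===== Notes on version B (the rewrite author's own statement) =====
-- stated objective: faster
-- what changed: Replaces A's interleaved count/accumulate/break loop (which recomputes max(data) every iteration and compares each element to the max) with boundary location via data.index(m, 1) plus the closed-form identity m*stop - sum(prefix), eliminating the per-element gap comparison and accumulation entirely.
import Mathlib
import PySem

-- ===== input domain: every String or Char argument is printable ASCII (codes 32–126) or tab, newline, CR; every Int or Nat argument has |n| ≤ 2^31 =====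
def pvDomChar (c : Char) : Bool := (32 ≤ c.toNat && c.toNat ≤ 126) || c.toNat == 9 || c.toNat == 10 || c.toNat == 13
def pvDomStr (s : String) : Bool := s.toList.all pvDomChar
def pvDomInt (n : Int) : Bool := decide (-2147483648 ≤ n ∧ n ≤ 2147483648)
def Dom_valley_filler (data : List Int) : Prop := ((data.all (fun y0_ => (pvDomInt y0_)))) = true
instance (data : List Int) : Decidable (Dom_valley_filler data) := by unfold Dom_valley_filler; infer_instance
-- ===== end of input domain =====

-- B replaces A's interleaved count/accumulate/break loop (which recomputes max(data) each
-- iteration and compares every element to it) with a boundary-location step plus the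
-- closed-form identity m*stop - sum(prefix); the equivalence is proved below.

-- ===== PORT A =====
-- max(data); Python raises on [], but A only calls it from inside the loop, so data ≠ [] there
-- (the .getD 0 default is never reached on any input the claim covers).
def max_finder (data : List Int) : Int := (PySem.List.max? data (fun x => x)).getD 0

-- the for-loop of A: state (count, O_count, first_run), early break returns the pair
def vfLoop (data : List Int) : List Int → Int → Int → Bool → Int × Int
  | [], count, o_count, _ => (o_count, count)
  | datum :: rest, count, o_count, first_run =>
    let count := count + 1
    let o_count := if datum < max_finder data then o_count + (max_finder data - datum) else o_count
    if first_run ≠ true && datum == max_finder data then (o_count, count)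
    else vfLoop data rest count o_count false

def valley_filler (data : List Int) : Int × Int := vfLoop data data 0 0 true

-- ===== PORT B =====
-- data.index(m, 1): first index ≥ 1 of m in data (absolute index), none = ValueError
def idxFrom1 (data : List Int) (m : Int) : Option Nat :=
  (PySem.List.index? (data.drop 1) m).map (· + 1)

def valley_filler_alt (data : List Int) : Int × Int :=
  match data with
  | [] => (0, 0)
  | _ =>
    let m := (PySem.List.max? data (fun x => x)).getD 0
    let stop : Nat := match idxFrom1 data m with
      | some i => i + 1
      | none => data.length
    -- every element <= m and elements equal to m contribute 0, so fill = m*stop - sum(prefix)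
    (m * (stop : Int) - (data.take stop).sum, (stop : Int))

-- ===== PRECONDITION & SPEC =====
def Spec_valley_filler (data : List Int) (out : Int × Int) : Prop := out = valley_filler_alt data
instance (data : List Int) (out : Int × Int) : Decidable (Spec_valley_filler data out) := by unfold Spec_valley_filler; infer_instance

-- ===== CLAIM (what is proved, stated in full; the proofs are below) =====
def Claim_equal_valley_filler : Prop := ∀ (data : List Int), Dom_valley_filler data → Spec_valley_filler data (valley_filler data)

-- ===== LEMMAS AND PROOFS =====

-- gap-sum over a list (what A's accumulator adds up)
def gapSum (m : Int) (l : List Int) : Int :=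
  l.foldl (fun a x => a + (if x < m then m - x else 0)) 0

theorem foldl_gap_init (m o : Int) (l : List Int) :
    l.foldl (fun a x => a + (if x < m then m - x else 0)) o =
      o + l.foldl (fun a x => a + (if x < m then m - x else 0)) 0 := by
  induction l generalizing o with
  | nil => simp
  | cons h t ih => simp only [List.foldl_cons]; rw [ih, ih (0 + _)]; ring

theorem gapSum_cons (m d : Int) (l : List Int) :
    gapSum m (d :: l) = (if d < m then m - d else 0) + gapSum m l := by
  unfold gapSum
  rw [List.foldl_cons, foldl_gap_init]; ring

-- on a list all of whose elements are ≤ m, the gap-sum is m*len - sum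
theorem gapSum_eq_closed (m : Int) (l : List Int) (h : ∀ x ∈ l, x ≤ m) :
    gapSum m l = m * (l.length : Int) - l.sum := by
  induction l with
  | nil => simp [gapSum]
  | cons d t ih =>
    rw [gapSum_cons, ih (fun x hx => h x (List.mem_cons_of_mem _ hx))]
    have hd : d ≤ m := h d (List.mem_cons_self)
    by_cases hlt : d < m
    · simp only [if_pos hlt, List.length_cons, List.sum_cons]; push_cast; ring
    · have : d = m := le_antisymm hd (not_lt.mp hlt)
      subst this
      simp only [if_neg hlt, List.length_cons, List.sum_cons]; push_cast; ring

-- the prefix A's loop effectively sums over, on the tail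
def stopTake (m : Int) (l : List Int) : List Int :=
  match PySem.List.index? l m with
  | some j => l.take (j + 1)
  | none => l

theorem stopTake_subset (m : Int) (l : List Int) : ∀ x ∈ stopTake m l, x ∈ l := by
  unfold stopTake
  cases PySem.List.index? l m with
  | none => exact fun x hx => hx
  | some j => exact fun x hx => (List.take_sublist _ _).mem hx

-- A's loop with first_run = false computes the gap-sum/length of stopTake on the remainder
theorem vfLoop_false (data : List Int) (l : List Int) (c o : Int) :
    vfLoop data l c o false =
      (o + gapSum (max_finder data) (stopTake (max_finder data) l),
       c + (stopTake (max_finder data) l).length) := by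
  induction l generalizing c o with
  | nil => simp [vfLoop, stopTake, gapSum, PySem.List.index?]
  | cons d rest ih =>
    by_cases hd : d = max_finder data
    · subst hd
      simp [vfLoop, stopTake, PySem.List.index?_eq_idxOf?, List.idxOf?_cons, gapSum]
    · have hne := PySem.List.index?_cons_of_ne rest hd
      simp only [vfLoop]
      rw [if_neg (by simp [hd])]
      rw [ih]
      unfold stopTake
      rw [hne]
      cases hj : PySem.List.index? rest (max_finder data) with
      | none =>
        simp only [Option.map_none]
        rw [Prod.mk.injEq]
        refine ⟨?_, ?_⟩
        · rw [gapSum_cons]; by_cases h : d < max_finder data <;> simp [h] <;> ring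
        · simp only [List.length_cons]; push_cast; ring
      | some j =>
        simp only [Option.map_some]
        rw [List.take_succ_cons, Prod.mk.injEq]
        refine ⟨?_, ?_⟩
        · rw [gapSum_cons]; by_cases h : d < max_finder data <;> simp [h] <;> ring
        · simp only [List.length_cons]; push_cast; ring

-- B on a nonempty list, expressed through stopTake and the closed form
theorem alt_cons (d : Int) (rest : List Int) :
    valley_filler_alt (d :: rest) =
      (max_finder (d :: rest) * (1 + ((stopTake (max_finder (d :: rest)) rest).length : Int))
         - (d :: stopTake (max_finder (d :: rest)) rest).sum,
       1 + ((stopTake (max_finder (d :: rest)) rest).length : Int)) := by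
  show (let m := (PySem.List.max? (d :: rest) (fun x => x)).getD 0
        let stop : Nat := match idxFrom1 (d :: rest) m with
          | some i => i + 1
          | none => (d :: rest).length
        (m * (stop : Int) - ((d :: rest).take stop).sum, (stop : Int))) = _
  have hm : (PySem.List.max? (d :: rest) (fun x => x)).getD 0 = max_finder (d :: rest) := rfl
  simp only [hm, idxFrom1, List.drop_succ_cons, List.drop_zero]
  unfold stopTake
  cases hj : PySem.List.index? rest (max_finder (d :: rest)) with
  | none =>
    simp only [Option.map_none]
    rw [List.take_length, Prod.mk.injEq]
    constructor
    · push_cast [List.length_cons]; ring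
    · push_cast [List.length_cons]; ring
  | some j =>
    obtain ⟨hk, -, -⟩ := PySem.List.getElem_of_index?_eq_some hj
    have hlen : (List.take (j + 1) rest).length = j + 1 :=
      List.length_take_of_le (by omega)
    simp only [Option.map_some]
    rw [List.take_succ_cons, Prod.mk.injEq]
    constructor
    · push_cast [List.length_cons, hlen]; ring
    · push_cast [List.length_cons, hlen]; ring

-- elements of data are ≤ max_finder data (data nonempty)
theorem le_max_finder (d : Int) (rest : List Int) :
    ∀ x ∈ d :: rest, x ≤ max_finder (d :: rest) := by
  intro x hx
  unfold max_finder
  cases hmax : PySem.List.max? (d :: rest) (fun y => y) with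
  | none => exact absurd hmax (by simp [PySem.List.max?_eq_none_iff])
  | some m => simpa using PySem.List.max?_isMax hmax x hx

-- ===== VERDICT (by name: the statement is the Claim_ definition above) =====
theorem valley_filler_spec : Claim_equal_valley_filler := by
  intro data _
  unfold Spec_valley_filler
  cases data with
  | nil => rfl
  | cons d rest =>
    have h1 : valley_filler (d :: rest) =
        vfLoop (d :: rest) rest (0 + 1)
          (if d < max_finder (d :: rest) then 0 + (max_finder (d :: rest) - d) else 0) false := by
      simp [valley_filler, vfLoop]
    have hle : ∀ x ∈ d :: stopTake (max_finder (d :: rest)) rest, x ≤ max_finder (d :: rest) := by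
      intro x hx
      rcases List.mem_cons.mp hx with h | h
      · exact le_max_finder d rest x (h ▸ List.mem_cons_self)
      · exact le_max_finder d rest x
          (List.mem_cons_of_mem _ (stopTake_subset _ _ x h))
    rw [h1, vfLoop_false, alt_cons, Prod.mk.injEq]
    refine ⟨?_, by push_cast; ring⟩
    have hclosed := gapSum_eq_closed (max_finder (d :: rest))
      (d :: stopTake (max_finder (d :: rest)) rest) hle
    rw [gapSum_cons] at hclosed
    by_cases h : d < max_finder (d :: rest)
    · simp only [if_pos h] at hclosed ⊢
      simp only [List.length_cons, List.sum_cons] at hclosed ⊢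
      push_cast at hclosed ⊢
      linarith
    · simp only [if_neg h] at hclosed ⊢
      simp only [List.length_cons, List.sum_cons] at hclosed ⊢
      push_cast at hclosed ⊢
      linarith
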